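-- pv_equiv track=rewrite | github.com/jaskrawo/tic-tac-toe | data_base.py | board_sort
-- ===== SOURCE A (Python) =====
-- def board_sort(move_n):
--
--     #move_list_X and move_list_O are used to sort moves by sign and number, from first to fifth in Xs and fourth in Os.
--     move_list_X=[[], [], [], [], []]
--     move_list_O=[[], [], [], []]
--
--     move_list = (move_list_X, move_list_O)
--
--
--
--     for i in move_n:
--         if i.get('board').count('X')==1 and i.get('board').count('O')==0:
--             move_list_X[0].append(i)
--
--
--         elif i.get('board').count('X')==1 and i.get('board').count('O')==1:
--             move_list_O[0].append(i)
--
--         elif i.get('board').count('X')==2 and i.get('board').count('O')==1: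
--             move_list_X[1].append(i)
--
--         elif i.get('board').count('X')==2 and i.get('board').count('O')==2:
--             move_list_O[1].append(i)
--
--         elif i.get('board').count('X')==3 and i.get('board').count('O')==2:
--             move_list_X[2].append(i)
--
--         elif i.get('board').count('X')==3 and i.get('board').count('O')==3:
--             move_list_O[2].append(i)
--
--         elif i.get('board').count('X')==4 and i.get('board').count('O')==3:
--             move_list_X[3].append(i)
--
--         elif i.get('board').count('X')==4 and i.get('board').count('O')==4:
--             move_list_O[3].append(i)
--
--         elif i.get('board').count('X')==5 and i.get('board').count('O')==4:
--             move_list_X[4].append(i)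
--
--         else:
--             continue
--
--     return move_list
-- ===== SOURCE B (Python) =====
-- def board_sort(move_n):
--     # Stage 1: compute each item's (X-count, O-count) key once.
--     # Stage 2: build each of the nine buckets by filtering the keyed list.
--     keyed = [((i.get('board').count('X'), i.get('board').count('O')), i) for i in move_n]
--     move_list_X = [[i for (c, i) in keyed if c == (x, x - 1)] for x in range(1, 6)]
--     move_list_O = [[i for (c, i) in keyed if c == (x, x)] for x in range(1, 5)]
--     return (move_list_X, move_list_O)
-- ===== Notes on version B (the rewrite author's own statement) =====
-- stated objective: simpler
-- what changed: Replaces the single-pass nine-way elif chain that mutates preallocated buckets with a staged pipeline: one pass computes each item's (X,O) count key, then each of the nine buckets is produced declaratively as a filter of the keyed list.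
import Mathlib
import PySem

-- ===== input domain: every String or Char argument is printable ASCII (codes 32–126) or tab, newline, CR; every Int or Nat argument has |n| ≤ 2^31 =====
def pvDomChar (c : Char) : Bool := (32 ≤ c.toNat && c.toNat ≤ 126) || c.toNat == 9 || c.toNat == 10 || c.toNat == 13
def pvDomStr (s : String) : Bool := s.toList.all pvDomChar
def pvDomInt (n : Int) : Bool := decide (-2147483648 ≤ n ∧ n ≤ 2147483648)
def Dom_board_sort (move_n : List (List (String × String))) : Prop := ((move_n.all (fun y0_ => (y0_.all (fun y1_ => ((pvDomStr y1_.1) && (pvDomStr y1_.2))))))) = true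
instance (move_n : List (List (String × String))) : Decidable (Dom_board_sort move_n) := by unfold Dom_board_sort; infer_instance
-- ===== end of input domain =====

-- ===== PORT A =====
-- B replaces the single-pass nine-way elif chain with a staged key-then-filter pipeline (objective: simpler).
-- Python dict.get(k): first-match lookup in the association list (exact for dicts, whose keys are unique).
def pyDictGet (d : List (String × String)) (k : String) : Option String :=
  (d.find? (fun p => p.1 == k)).map (·.2)

-- i.get('board').count(c); Pre_ guarantees the key is present (Python raises AttributeError on None otherwise)
def cntA (i : List (String × String)) (c : String) : Nat :=
  PySem.Str.count ((pyDictGet i "board").getD "") c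

def bump (l : List (List (List (String × String)))) (k : Nat) (i : List (String × String)) :
    List (List (List (String × String))) :=
  l.modify k (· ++ [i])

def stepA (s : (List (List (List (String × String)))) × (List (List (List (String × String)))))
    (i : List (String × String)) :
    (List (List (List (String × String)))) × (List (List (List (String × String)))) :=
  if cntA i "X" = 1 ∧ cntA i "O" = 0 then (bump s.1 0 i, s.2)
  else if cntA i "X" = 1 ∧ cntA i "O" = 1 then (s.1, bump s.2 0 i)
  else if cntA i "X" = 2 ∧ cntA i "O" = 1 then (bump s.1 1 i, s.2)
  else if cntA i "X" = 2 ∧ cntA i "O" = 2 then (s.1, bump s.2 1 i)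
  else if cntA i "X" = 3 ∧ cntA i "O" = 2 then (bump s.1 2 i, s.2)
  else if cntA i "X" = 3 ∧ cntA i "O" = 3 then (s.1, bump s.2 2 i)
  else if cntA i "X" = 4 ∧ cntA i "O" = 3 then (bump s.1 3 i, s.2)
  else if cntA i "X" = 4 ∧ cntA i "O" = 4 then (s.1, bump s.2 3 i)
  else if cntA i "X" = 5 ∧ cntA i "O" = 4 then (bump s.1 4 i, s.2)
  else s

def board_sort (move_n : List (List (String × String))) :
    (List (List (List (String × String)))) × (List (List (List (String × String)))) :=
  move_n.foldl stepA ([[], [], [], [], []], [[], [], [], []])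

-- ===== PORT B =====
-- (i.get('board').count('X'), i.get('board').count('O')), the key computed once per item
def keyB (i : List (String × String)) : Nat × Nat :=
  (PySem.Str.count ((pyDictGet i "board").getD "") "X",
   PySem.Str.count ((pyDictGet i "board").getD "") "O")

def board_sort_alt (move_n : List (List (String × String))) :
    (List (List (List (String × String)))) × (List (List (List (String × String)))) :=
  let keyed := move_n.map (fun i => (keyB i, i))
  ((List.range' 1 5).map (fun x => (keyed.filter (fun p => p.1 == (x, x - 1))).map (·.2)),
   (List.range' 1 4).map (fun x => (keyed.filter (fun p => p.1 == (x, x))).map (·.2)))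

-- ===== PRECONDITION & SPEC =====
-- Pre_ excludes items whose dict lacks a 'board' key: there i.get('board') is None and A raises AttributeError.
def Pre_board_sort (move_n : List (List (String × String))) : Prop :=
  (move_n.all (fun i => i.any (fun p => p.1 == "board"))) = true
instance (move_n : List (List (String × String))) : Decidable (Pre_board_sort move_n) := by unfold Pre_board_sort; infer_instance
def pvWitness_board_sort : (List (List (String × String))) := [[("board", "X")], [("board", "XO")]]
def Spec_board_sort (move_n : List (List (String × String))) (out : (List (List (List (String × String)))) × (List (List (List (String × String))))) : Prop := out = board_sort_alt move_n
instance (move_n : List (List (String × String))) (out : (List (List (List (String × String)))) × (List (List (List (String × String))))) : Decidable (Spec_board_sort move_n out) := by unfold Spec_board_sort; infer_instance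

-- ===== CLAIM (what is proved, stated in full; the proofs are below) =====
def Claim_equal_board_sort : Prop := ∀ (move_n : List (List (String × String))), Dom_board_sort move_n → Pre_board_sort move_n → Spec_board_sort move_n (board_sort move_n)

-- ===== LEMMAS AND PROOFS =====
-- bucket of items whose key is (k, k-1) resp. (k, k), in input order
def FX (k : Nat) (xs : List (List (String × String))) : List (List (String × String)) :=
  xs.filter (fun i => keyB i == (k, k - 1))
def FO (k : Nat) (xs : List (List (String × String))) : List (List (String × String)) :=
  xs.filter (fun i => keyB i == (k, k))

theorem alt_eq (move_n : List (List (String × String))) :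
    board_sort_alt move_n =
      ([FX 1 move_n, FX 2 move_n, FX 3 move_n, FX 4 move_n, FX 5 move_n],
       [FO 1 move_n, FO 2 move_n, FO 3 move_n, FO 4 move_n]) := by
  simp only [board_sort_alt, show List.range' 1 5 = [1,2,3,4,5] from rfl,
    show List.range' 1 4 = [1,2,3,4] from rfl, List.map_cons, List.map_nil]
  simp [List.filter_map, List.map_map, Function.comp_def, FX, FO]

-- the fold of A, from an arbitrary 9-bucket state, appends exactly the filters
theorem foldA (xs : List (List (String × String)))
    (l0 l1 l2 l3 l4 m0 m1 m2 m3 : List (List (String × String))) :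
    xs.foldl stepA ([l0, l1, l2, l3, l4], [m0, m1, m2, m3]) =
      ([l0 ++ FX 1 xs, l1 ++ FX 2 xs, l2 ++ FX 3 xs, l3 ++ FX 4 xs, l4 ++ FX 5 xs],
       [m0 ++ FO 1 xs, m1 ++ FO 2 xs, m2 ++ FO 3 xs, m3 ++ FO 4 xs]) := by
  induction xs generalizing l0 l1 l2 l3 l4 m0 m1 m2 m3 with
  | nil => simp [FX, FO]
  | cons i xs ih =>
    have hk : keyB i = (cntA i "X", cntA i "O") := rfl
    simp only [List.foldl_cons, stepA]
    split_ifs with h1 h2 h3 h4 h5 h6 h7 h8 h9 <;>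
      simp only [bump, List.modify, ih, FX, FO, List.filter_cons, hk, Prod.mk.injEq,
        beq_iff_eq] <;>
      simp_all [List.append_assoc, FX, FO]

-- ===== VERDICT (by name: the statement is the Claim_ definition above) =====
theorem board_sort_spec : Claim_equal_board_sort := by
  intro move_n _ _
  unfold Spec_board_sort board_sort
  rw [alt_eq, foldA]
  simp
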